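-- pv_equiv track=rewrite | github.com/cvr-bhupalreddy/dsa-python-2025 | DSA/Strings/pattern_matching/7.BinaryNumberDivisibleBy3.py | is_binary_divisible_by_3
-- ===== SOURCE A (Python) =====
-- def is_binary_divisible_by_3(binary: str) -> bool:
--     """
--     DFA to check if a binary string represents
--     a number divisible by 3.
--
--     States represent remainder mod 3.
--     Accepting state: remainder == 0
--     """
--
--     # DFA states = remainder mod 3
--     # state 0 → divisible by 3
--     # state 1 → remainder 1
--     # state 2 → remainder 2
--
--     # Transition table:
--     # new_remainder = (old_remainder * 2 + bit) % 3
--     transition = {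
--         0: {'0': 0, '1': 1},
--         1: {'0': 2, '1': 0},
--         2: {'0': 1, '1': 2}
--     }
--
--     state = 0  # start state (value = 0)
--
--     for bit in binary:
--         if bit not in ('0', '1'):
--             return False  # invalid binary string
--         state = transition[state][bit]
--
--     return state == 0
-- ===== SOURCE B (Python) =====
-- def is_binary_divisible_by_3(binary: str) -> bool:
--     if any(c not in '01' for c in binary):
--         return False
--     if not binary:
--         return True
--     return int(binary, 2) % 3 == 0
-- ===== Notes on version B (the rewrite author's own statement) =====
-- stated objective: idiomatic
-- what changed: Replaces the hand-rolled DFA transition table with validation followed by built-in base-2 conversion and a single modulo check.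
import Mathlib
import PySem

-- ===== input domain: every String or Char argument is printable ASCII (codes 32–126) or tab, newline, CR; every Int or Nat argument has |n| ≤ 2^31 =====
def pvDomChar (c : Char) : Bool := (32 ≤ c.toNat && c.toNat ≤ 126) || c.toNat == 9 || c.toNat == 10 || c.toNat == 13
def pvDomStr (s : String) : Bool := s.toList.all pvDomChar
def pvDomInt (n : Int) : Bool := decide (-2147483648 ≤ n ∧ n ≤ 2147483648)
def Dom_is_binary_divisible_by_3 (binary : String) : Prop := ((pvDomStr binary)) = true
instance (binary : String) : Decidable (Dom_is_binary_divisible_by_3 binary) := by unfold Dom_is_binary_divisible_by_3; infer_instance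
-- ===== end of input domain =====

-- ===== PORT A =====
-- B replaces A's DFA transition table by char validation plus base-2 conversion and one modulo (idiomatic).

-- literal encoding of A's nested transition dict: transition[state][bit]
def pvTransition (state : Int) (bit : Char) : Int :=
  if state = 0 then (if bit = '0' then 0 else 1)
  else if state = 1 then (if bit = '0' then 2 else 0)
  else (if bit = '0' then 1 else 2)

-- A's for-loop with early return on an invalid character
def pvGoA : List Char → Int → Bool
  | [], state => state == 0
  | bit :: rest, state =>
    if ¬ (bit = '0' ∨ bit = '1') then false
    else pvGoA rest (pvTransition state bit)

def is_binary_divisible_by_3 (binary : String) : Bool :=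
  pvGoA binary.toList 0

-- ===== PORT B =====
-- int(binary, 2) ported by hand as the standard base-2 fold; exact for validated nonempty '0'/'1' strings
def pvBinVal (cs : List Char) : Int :=
  cs.foldl (fun v c => 2 * v + (if c = '1' then 1 else 0)) 0

def is_binary_divisible_by_3_alt (binary : String) : Bool :=
  if binary.toList.any (fun c => ¬ (c = '0' ∨ c = '1')) then false
  else if binary.toList.isEmpty then true
  else pvBinVal binary.toList % 3 == 0
-- ===== PRECONDITION & SPEC =====
def Spec_is_binary_divisible_by_3 (binary : String) (out : Bool) : Prop := out = is_binary_divisible_by_3_alt binary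
instance (binary : String) (out : Bool) : Decidable (Spec_is_binary_divisible_by_3 binary out) := by unfold Spec_is_binary_divisible_by_3; infer_instance

-- ===== CLAIM (what is proved, stated in full; the proofs are below) =====
def Claim_equal_is_binary_divisible_by_3 : Prop := ∀ (binary : String), Dom_is_binary_divisible_by_3 binary → Spec_is_binary_divisible_by_3 binary (is_binary_divisible_by_3 binary)

-- ===== LEMMAS AND PROOFS =====

-- ===== VERDICT (by name: the statement is the Claim_ definition above) =====
-- invariant: A's DFA state after a valid prefix equals 2*v+bit folded value mod 3
theorem pvGoA_eq (cs : List Char) : ∀ (v : Int),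
    pvGoA cs (v % 3) =
      (if cs.any (fun c => ¬ (c = '0' ∨ c = '1')) then false
       else ((cs.foldl (fun w c => 2 * w + (if c = '1' then 1 else 0)) v) % 3 == 0)) := by
  induction cs with
  | nil => intro v; simp [pvGoA]
  | cons c cs ih =>
    intro v
    by_cases hc : c = '0' ∨ c = '1'
    · have htrans : pvTransition (v % 3) c = (2 * v + (if c = '1' then 1 else 0)) % 3 := by
        have h3 : v % 3 = 0 ∨ v % 3 = 1 ∨ v % 3 = 2 := by omega
        rcases hc with hc | hc <;> subst hc <;>
          rcases h3 with h | h | h <;> simp [pvTransition, h] <;> omega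
      have : pvGoA (c :: cs) (v % 3) = pvGoA cs ((2 * v + (if c = '1' then 1 else 0)) % 3) := by
        simp [pvGoA, hc, htrans]
      rw [this, ih]
      rcases hc with hc | hc <;> subst hc <;> simp [List.any_cons]
    · simp [pvGoA, hc, List.any_cons]

theorem is_binary_divisible_by_3_spec : Claim_equal_is_binary_divisible_by_3 := by
  intro binary _
  unfold Spec_is_binary_divisible_by_3 is_binary_divisible_by_3 is_binary_divisible_by_3_alt pvBinVal
  have := pvGoA_eq binary.toList 0
  simp only [show (0:Int) % 3 = 0 from rfl] at this
  rw [this]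
  cases h : binary.toList with
  | nil => simp
  | cons c cs => by_cases hbad : (c :: cs).any (fun c => ¬ (c = '0' ∨ c = '1')) <;> simp [hbad]
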